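-- pv_equiv track=rewrite | github.com/geodow06/Mathematics | godmathlib/linear_algebra/operations.py | minor_indices
-- ===== SOURCE A (Python) =====
-- def minor_indices(size):
--     values = []
--     for i in range(size):
--         columns = []
--         for j in range(size - 1):
--             columns.append((i + (j + 1)) % size)
--         values = values + sorted(columns)
--     return values
-- ===== SOURCE B (Python) =====
-- def minor_indices(size):
--     base = list(range(size))
--     result = []
--     for i in base:
--         result += base[:i] + base[i+1:]
--     return result
-- ===== Notes on version B (the rewrite author's own statement) =====
-- stated objective: simpler
-- what changed: Precompute the index table base=range(size) once and extend the result with base[:i]+base[i+1:] per row by slicing, replacing the inner modular-arithmetic loop, the per-row sort and A's quadratic 'values = values + ...' list rebuilding.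
import Mathlib
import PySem

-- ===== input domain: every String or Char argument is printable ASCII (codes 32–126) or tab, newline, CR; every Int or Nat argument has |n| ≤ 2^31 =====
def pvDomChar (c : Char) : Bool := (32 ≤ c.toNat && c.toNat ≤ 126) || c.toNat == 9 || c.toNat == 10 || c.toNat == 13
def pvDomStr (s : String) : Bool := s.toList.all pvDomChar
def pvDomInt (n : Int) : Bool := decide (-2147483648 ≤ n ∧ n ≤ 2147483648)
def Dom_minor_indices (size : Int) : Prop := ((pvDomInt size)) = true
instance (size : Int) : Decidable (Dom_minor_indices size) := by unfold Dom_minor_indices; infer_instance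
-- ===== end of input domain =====

-- B replaces the inner modular-arithmetic loop + sort by slicing a precomputed index table (simpler).

-- ===== PORT A =====
def minor_indices (size : Int) : List Int :=
  (PySem.List.pyRange 0 size 1).foldl (fun values i =>
    let columns := (PySem.List.pyRange 0 (size - 1) 1).foldl
      (fun cols j => cols ++ [PySem.Int.mod (i + (j + 1)) size]) []
    values ++ PySem.List.sorted columns (fun x => x) false) []

-- ===== PORT B =====
def minor_indices_alt (size : Int) : List Int :=
  let base := PySem.List.pyRange 0 size 1
  base.foldl (fun result i =>
    result ++ (PySem.List.slice base none (some i) ++ PySem.List.slice base (some (i + 1)) none)) []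

-- ===== PRECONDITION & SPEC =====
def Spec_minor_indices (size : Int) (out : List Int) : Prop := out = minor_indices_alt size
instance (size : Int) (out : List Int) : Decidable (Spec_minor_indices size out) := by unfold Spec_minor_indices; infer_instance

-- ===== CLAIM (what is proved, stated in full; the proofs are below) =====
def Claim_equal_minor_indices : Prop := ∀ (size : Int), Dom_minor_indices size → Spec_minor_indices size (minor_indices size)

-- ===== LEMMAS AND PROOFS =====

theorem pv_flatMap_singleton (l : List Int) (f : Int → Int) :
    l.flatMap (fun j => [f j]) = l.map f := by
  induction l with
  | nil => rfl
  | cons x xs ih => simp only [List.flatMap_cons, List.map_cons, List.singleton_append, ih]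

-- A's inner loop produces the wrapped range [i+1 … size-1] ++ [0 … i-1]
theorem pv_columns_eq (size i : Int) (h0 : 0 ≤ i) (h1 : i < size) :
    (PySem.List.pyRange 0 (size - 1) 1).map (fun j => PySem.Int.mod (i + (j + 1)) size)
      = PySem.List.pyRange (i + 1) size 1 ++ PySem.List.pyRange 0 i 1 := by
  have hsplit := PySem.List.pyRange_one_append 0 (size - 1 - i) (size - 1) (by omega) (by omega)
  rw [hsplit, List.map_append]
  congr 1
  · rw [PySem.List.pyRange_one, PySem.List.pyRange_one, List.map_map]
    have hlen : (size - 1 - i - 0).toNat = (size - (i + 1)).toNat := by omega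
    rw [hlen]
    apply List.map_congr_left
    intro k hk
    simp only [List.mem_range] at hk
    have hk' : (k : Int) < size - (i + 1) := by omega
    simp only [Function.comp_apply]
    have hm : PySem.Int.mod (i + (0 + (k : Int) + 1)) size = i + (0 + (k : Int) + 1) := by
      rw [PySem.Int.mod_eq_emod_of_pos (by omega)]
      exact Int.emod_eq_of_lt (by omega) (by omega)
    rw [hm]; omega
  · rw [PySem.List.pyRange_one, PySem.List.pyRange_one, List.map_map]
    have hlen : (size - 1 - (size - 1 - i)).toNat = (i - 0).toNat := by omega
    rw [hlen]
    apply List.map_congr_left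
    intro k hk
    simp only [List.mem_range] at hk
    have hk' : (k : Int) < i := by omega
    simp only [Function.comp_apply]
    have hm : PySem.Int.mod (i + (size - 1 - i + (k : Int) + 1)) size = (k : Int) := by
      rw [PySem.Int.mod_eq_emod_of_pos (by omega)]
      have h : i + (size - 1 - i + (k : Int) + 1) = (k : Int) + size := by ring
      rw [h, Int.add_emod_right]
      exact Int.emod_eq_of_lt (by omega) (by omega)
    rw [hm]; omega

-- sorting the wrapped range gives the two ordered pieces
theorem pv_sorted_eq (size i : Int) :
    PySem.List.sorted (PySem.List.pyRange (i + 1) size 1 ++ PySem.List.pyRange 0 i 1)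
        (fun x => x) false
      = PySem.List.pyRange 0 i 1 ++ PySem.List.pyRange (i + 1) size 1 := by
  apply PySem.List.sorted_eq_of_perm_of_pairwise_lt
  · exact List.perm_append_comm
  · rw [List.pairwise_append]
    refine ⟨PySem.List.pairwise_lt_pyRange_one _ _, PySem.List.pairwise_lt_pyRange_one _ _, ?_⟩
    intro a ha b hb
    rw [PySem.List.mem_pyRange_one] at ha hb
    omega

-- B's two slices of the precomputed table are the same two pieces
theorem pv_slice_eq (size i : Int) (h0 : 0 ≤ i) (h1 : i < size) :
    PySem.List.slice (PySem.List.pyRange 0 size 1) none (some i)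
        ++ PySem.List.slice (PySem.List.pyRange 0 size 1) (some (i + 1)) none
      = PySem.List.pyRange 0 i 1 ++ PySem.List.pyRange (i + 1) size 1 := by
  congr 1
  · rw [PySem.List.slice_to _ h0,
      PySem.List.pyRange_one_append 0 i size h0 (by omega)]
    have : i.toNat = (PySem.List.pyRange 0 i 1).length := by
      rw [PySem.List.length_pyRange_one]; omega
    rw [this, List.take_left]
  · rw [PySem.List.slice_from _ (by omega),
      PySem.List.pyRange_one_append 0 (i + 1) size (by omega) (by omega)]
    have : (i + 1).toNat = (PySem.List.pyRange 0 (i + 1) 1).length := by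
      rw [PySem.List.length_pyRange_one]; omega
    rw [this, List.drop_left]

-- ===== VERDICT (by name: the statement is the Claim_ definition above) =====
theorem minor_indices_spec : Claim_equal_minor_indices := by
  intro size _
  unfold Spec_minor_indices minor_indices minor_indices_alt
  apply PySem.List.foldl_congr_mem
  intro acc i hi
  rw [PySem.List.mem_pyRange_one] at hi
  obtain ⟨h0, h1⟩ := hi
  have hcols : (PySem.List.pyRange 0 (size - 1) 1).foldl
      (fun cols j => cols ++ [PySem.Int.mod (i + (j + 1)) size]) []
      = PySem.List.pyRange (i + 1) size 1 ++ PySem.List.pyRange 0 i 1 := by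
    rw [PySem.List.foldl_append_eq_flatMap (g := fun j => [PySem.Int.mod (i + (j + 1)) size])]
    rw [List.nil_append, pv_flatMap_singleton]
    exact pv_columns_eq size i h0 h1
  simp only [hcols, pv_sorted_eq size i, pv_slice_eq size i h0 h1]
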